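-- pv_equiv track=rewrite | github.com/PashaShahbazi/pasha_lexer | pasha_lexer.py | rango
-- ===== SOURCE A (Python) =====
-- def rango(lexim):
--     j = 0
--     state = 0
--     while True:
--         ch = lexim[j]
--         match state:
--             case 0:
--                 if ch == 'r':
--                     state = 1
--                     j += 1
--                 else:
--                     state = 6
--             case 1:
--                 if ch == 'a':
--                     state = 2
--                     j += 1
--                 else:
--                     state = 6
--             case 2:
--                 if ch == 'n':
--                     state = 3
--                     j += 1
--                 else:
--                     state = 6
--             case 3:
--                 if ch == 'g':
--                     state = 4
--                     j += 1
--                 else: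
--                     state = 6
--             case 4:
--                 if ch == 'o':
--                     state = 5
--                     j += 1
--                 else:
--                     state = 6
--             case 5:
--                 if ch == '\n':
--                     return True, '<range_num>'
--                 else:
--                     state = 6
--             case 6:
--                 return False, None
-- ===== SOURCE B (Python) =====
-- def rango(lexim):
--     if lexim.startswith('rango\n'):
--         return True, '<range_num>'
--     return False, None
-- ===== Notes on version B (the rewrite author's own statement) =====
-- stated objective: simpler
-- what changed: Replaced the explicit 7-state DFA (state variable, index, match/case transition table) with a single built-in prefix test lexim.startswith('rango\n'); no explicit per-character loop or state remains.
-- crash fix: On proper prefixes of 'rango\n' (including the empty string) A raises IndexError while B returns (False, None). — e.g. on rango("rango"): A raises IndexError, B returns (false, none)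
import Mathlib
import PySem

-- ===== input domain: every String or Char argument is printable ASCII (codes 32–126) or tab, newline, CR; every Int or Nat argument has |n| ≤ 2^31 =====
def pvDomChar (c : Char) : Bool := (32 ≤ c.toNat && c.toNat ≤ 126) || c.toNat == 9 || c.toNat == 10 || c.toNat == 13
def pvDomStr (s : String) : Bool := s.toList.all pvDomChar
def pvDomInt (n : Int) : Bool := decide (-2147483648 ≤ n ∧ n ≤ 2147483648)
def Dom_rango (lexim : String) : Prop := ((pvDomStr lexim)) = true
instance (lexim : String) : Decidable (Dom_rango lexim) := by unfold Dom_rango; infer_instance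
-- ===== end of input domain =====

-- B replaces A's explicit 7-state DFA with a single built-in prefix test (startswith);
-- where A raises IndexError (proper prefixes of "rango\n") B returns (False, None) — see Raises_rango.

-- ===== PORT A =====
-- A's while-loop: state machine over (j, state); the `none` branch of the index read is
-- Python's IndexError (excluded by Pre_rango).
def rangoLoop (cs : List Char) (j : Nat) (state : Nat) : Bool × Option String :=
  match PySem.List.pyGet? cs (j : Int) with
  | none => (false, none)  -- IndexError in Python; outside Pre_rango
  | some ch =>
    if _h0 : state = 0 then
      (if ch = 'r' then rangoLoop cs (j+1) 1 else rangoLoop cs j 6)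
    else if _h1 : state = 1 then
      (if ch = 'a' then rangoLoop cs (j+1) 2 else rangoLoop cs j 6)
    else if _h2 : state = 2 then
      (if ch = 'n' then rangoLoop cs (j+1) 3 else rangoLoop cs j 6)
    else if _h3 : state = 3 then
      (if ch = 'g' then rangoLoop cs (j+1) 4 else rangoLoop cs j 6)
    else if _h4 : state = 4 then
      (if ch = 'o' then rangoLoop cs (j+1) 5 else rangoLoop cs j 6)
    else if _h5 : state = 5 then
      (if ch = '\n' then (true, some "<range_num>") else rangoLoop cs j 6)
    else
      (false, none)  -- case 6
termination_by 6 - state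
decreasing_by all_goals omega

def rango (lexim : String) : Bool × Option String :=
  rangoLoop lexim.toList 0 0

-- ===== PORT B =====
def rango_alt (lexim : String) : Bool × Option String :=
  if PySem.Str.startswith lexim "rango\n" then (true, some "<range_num>") else (false, none)

-- ===== PRECONDITION & SPEC =====
-- Pre_ excludes exactly the inputs where the Python A raises IndexError: the proper
-- prefixes of "rango\n" (including "").
def Pre_rango (lexim : String) : Prop :=
  lexim = "rango\n" ∨ ¬ (lexim.toList <+: "rango\n".toList)
instance (lexim : String) : Decidable (Pre_rango lexim) := by unfold Pre_rango; infer_instance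

def pvWitness_rango : String := "rango\n"

-- On proper prefixes of "rango\n" (including "") A raises IndexError while B returns (False, None).
def Raises_rango (lexim : String) : Prop :=
  lexim.toList <+: "rango\n".toList ∧ lexim ≠ "rango\n"
instance (lexim : String) : Decidable (Raises_rango lexim) := by unfold Raises_rango; infer_instance

def pvRaiseWitness_rango : String := "rango"
def pvRaiseWitnessOut_rango : Bool × Option String := (false, none)

def Spec_rango (lexim : String) (out : Bool × Option String) : Prop := out = rango_alt lexim
instance (lexim : String) (out : Bool × Option String) : Decidable (Spec_rango lexim out) := by unfold Spec_rango; infer_instance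

-- ===== CLAIM (what is proved, stated in full; the proofs are below) =====
def Claim_equal_rango : Prop := ∀ (lexim : String), Dom_rango lexim → Pre_rango lexim → Spec_rango lexim (rango lexim)
def Claim_raises_rango : Prop := (∀ (lexim : String), Dom_rango lexim → Raises_rango lexim → ¬ Pre_rango lexim) ∧ (Dom_rango (pvRaiseWitness_rango) ∧ Raises_rango (pvRaiseWitness_rango) ∧ rango_alt (pvRaiseWitness_rango) = pvRaiseWitnessOut_rango)

-- ===== LEMMAS AND PROOFS =====

-- proof-side helper: the remaining target to match and the current position
def rangoGo (cs : List Char) (tgt : List Char) (i : Nat) : Bool × Option String :=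
  match tgt with
  | [] => (true, some "<range_num>")
  | c :: rest =>
    match PySem.List.pyGet? cs (i : Int) with
    | none => (false, none)
    | some x => if x ≠ c then (false, none) else rangoGo cs rest (i+1)

lemma rangoLoop_six (cs : List Char) (j : Nat) : rangoLoop cs j 6 = (false, none) := by
  rw [rangoLoop.eq_def]
  cases PySem.List.pyGet? cs (j : Int) <;> simp

lemma rangoLoop_five (cs : List Char) (j : Nat) :
    rangoLoop cs j 5 = rangoGo cs ['\n'] j := by
  rw [rangoLoop.eq_def]
  cases h : PySem.List.pyGet? cs (j : Int) with
  | none => simp [rangoGo, h]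
  | some ch =>
    by_cases hc : ch = '\n' <;> simp [rangoGo, h, hc, rangoLoop_six]

lemma rangoLoop_four (cs : List Char) (j : Nat) :
    rangoLoop cs j 4 = rangoGo cs ['o', '\n'] j := by
  rw [rangoLoop.eq_def]
  cases h : PySem.List.pyGet? cs (j : Int) with
  | none => simp [rangoGo, h]
  | some ch =>
    by_cases hc : ch = 'o' <;> simp [rangoGo, h, hc, rangoLoop_six, rangoLoop_five]

lemma rangoLoop_three (cs : List Char) (j : Nat) :
    rangoLoop cs j 3 = rangoGo cs ['g', 'o', '\n'] j := by
  rw [rangoLoop.eq_def]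
  cases h : PySem.List.pyGet? cs (j : Int) with
  | none => simp [rangoGo, h]
  | some ch =>
    by_cases hc : ch = 'g' <;> simp [rangoGo, h, hc, rangoLoop_six, rangoLoop_four]

lemma rangoLoop_two (cs : List Char) (j : Nat) :
    rangoLoop cs j 2 = rangoGo cs ['n', 'g', 'o', '\n'] j := by
  rw [rangoLoop.eq_def]
  cases h : PySem.List.pyGet? cs (j : Int) with
  | none => simp [rangoGo, h]
  | some ch =>
    by_cases hc : ch = 'n' <;> simp [rangoGo, h, hc, rangoLoop_six, rangoLoop_three]

lemma rangoLoop_one (cs : List Char) (j : Nat) :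
    rangoLoop cs j 1 = rangoGo cs ['a', 'n', 'g', 'o', '\n'] j := by
  rw [rangoLoop.eq_def]
  cases h : PySem.List.pyGet? cs (j : Int) with
  | none => simp [rangoGo, h]
  | some ch =>
    by_cases hc : ch = 'a' <;> simp [rangoGo, h, hc, rangoLoop_six, rangoLoop_two]

lemma rangoLoop_zero (cs : List Char) (j : Nat) :
    rangoLoop cs j 0 = rangoGo cs ['r', 'a', 'n', 'g', 'o', '\n'] j := by
  rw [rangoLoop.eq_def]
  cases h : PySem.List.pyGet? cs (j : Int) with
  | none => simp [rangoGo, h]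
  | some ch =>
    by_cases hc : ch = 'r' <;> simp [rangoGo, h, hc, rangoLoop_six, rangoLoop_one]

-- rangoGo decides the prefix relation (the none / mismatch cases both return (false, none))
lemma rangoGo_eq_prefix (cs : List Char) (tgt : List Char) (i : Nat) :
    rangoGo cs tgt i =
      if tgt <+: cs.drop i then (true, some "<range_num>") else (false, none) := by
  induction tgt generalizing i with
  | nil => simp [rangoGo]
  | cons c rest ih =>
    rw [rangoGo]
    cases h : PySem.List.pyGet? cs (i : Int) with
    | none =>
      have hlen : cs.length ≤ i := by
        by_contra hlt
        push_neg at hlt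
        simp [PySem.List.pyGet?, PySem.List.pyIdx?, hlt] at h
      simp [List.drop_eq_nil_of_le hlen]
    | some x =>
      have hx : cs[i]? = some x := by
        by_cases hlt : i < cs.length
        · simpa [PySem.List.pyGet?, PySem.List.pyIdx?, hlt] using h
        · simp [PySem.List.pyGet?, PySem.List.pyIdx?, hlt] at h
      have hdrop : cs.drop i = x :: cs.drop (i + 1) := by
        have hlt : i < cs.length := by
          by_contra hge
          simp [List.getElem?_eq_none (by omega : cs.length ≤ i)] at hx
        rw [List.drop_eq_getElem_cons hlt]
        have : cs[i] = x := by simpa [List.getElem?_eq_getElem hlt] using hx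
        rw [this]
      by_cases hc : x = c
      · subst hc
        simp [hdrop, ih]
      · simp [hc, hdrop, List.cons_prefix_cons]
        intro he
        exact absurd he.symm hc

-- ===== VERDICT (by name: the statement is the Claim_ definition above) =====
theorem rango_spec : Claim_equal_rango := by
  intro lexim _dom _pre
  unfold Spec_rango rango rango_alt
  rw [rangoLoop_zero, rangoGo_eq_prefix, List.drop_zero]
  by_cases hp : ['r', 'a', 'n', 'g', 'o', '\n'] <+: lexim.toList
  · have hs : PySem.Chars.startswith lexim.toList ['r', 'a', 'n', 'g', 'o', '\n'] = true :=
      (PySem.Chars.startswith_iff _ _).mpr hp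
    simp [PySem.Str.startswith_eq, hp, hs]
  · have hs : PySem.Chars.startswith lexim.toList ['r', 'a', 'n', 'g', 'o', '\n'] = false := by
      rw [Bool.eq_false_iff]
      intro hT
      exact hp ((PySem.Chars.startswith_iff _ _).mp hT)
    simp [PySem.Str.startswith_eq, hp, hs]

@[simp] theorem rango_raises : Claim_raises_rango := by
  unfold Claim_raises_rango
  refine ⟨?_, by decide⟩
  intro lexim _dom hr hpre
  rcases hpre with h | h
  · exact hr.2 h
  · exact h hr.1
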